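-- pv_equiv track=rewrite | github.com/jayak0776/Accenture-Reinprep-Problems-Codes | RienPrep/P40PyramidSum.py | pyramidSum
-- ===== SOURCE A (Python) =====
-- def pyramidSum(n):
--     totalSum=0
--     for i in range(1,n+1):
--         for j in range(i,0,-1):
--             totalSum+=j
--         for j in range(2,i+1):
--             totalSum+=j
--     return totalSum
-- ===== SOURCE B (Python) =====
-- def pyramidSum(n):
--     # Each pass of A's outer loop adds i*(i+1) - 1; summing gives a closed form.
--     if n <= 0:
--         return 0
--     return n * (n + 1) * (n + 2) // 3 - n
-- ===== Notes on version B (the rewrite author's own statement) =====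
-- stated objective: faster
-- what changed: Replaced the nested loops (each outer pass summing two arithmetic ranges) by the closed-form formula n*(n+1)*(n+2)//3 - n.
import Mathlib
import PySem

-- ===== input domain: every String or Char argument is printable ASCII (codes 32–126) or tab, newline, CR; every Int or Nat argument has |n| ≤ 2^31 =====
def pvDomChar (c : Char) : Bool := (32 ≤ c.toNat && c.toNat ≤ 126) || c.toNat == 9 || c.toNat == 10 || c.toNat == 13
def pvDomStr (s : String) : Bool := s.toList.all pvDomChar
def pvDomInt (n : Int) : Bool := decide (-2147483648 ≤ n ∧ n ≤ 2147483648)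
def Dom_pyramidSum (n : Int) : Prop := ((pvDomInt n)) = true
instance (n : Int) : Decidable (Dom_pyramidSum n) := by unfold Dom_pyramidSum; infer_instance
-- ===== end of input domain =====

-- B replaces A's nested loops by the closed-form formula n*(n+1)*(n+2)//3 - n (asymptotically faster).


-- ===== PORT A =====
def pyramidSum (n : Int) : Int :=
  (PySem.List.pyRange 1 (n + 1) 1).foldl (fun totalSum i =>
    (PySem.List.pyRange 2 (i + 1) 1).foldl (fun t j => t + j)
      ((PySem.List.pyRange i 0 (-1)).foldl (fun t j => t + j) totalSum)) 0

-- ===== PORT B =====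
def pyramidSum_alt (n : Int) : Int :=
  if n ≤ 0 then 0
  else PySem.Int.floordiv (n * (n + 1) * (n + 2)) 3 - n

-- ===== PRECONDITION & SPEC =====
def Spec_pyramidSum (n : Int) (out : Int) : Prop := out = pyramidSum_alt n
instance (n : Int) (out : Int) : Decidable (Spec_pyramidSum n out) := by unfold Spec_pyramidSum; infer_instance

-- ===== CLAIM (what is proved, stated in full; the proofs are below) =====
def Claim_equal_pyramidSum : Prop := ∀ (n : Int), Dom_pyramidSum n → Spec_pyramidSum n (pyramidSum n)

-- ===== LEMMAS AND PROOFS =====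

-- sum of range(i, 0, -1) = i*(i+1)/2 (stated doubled to avoid division)
lemma sum_down (i : Nat) : (PySem.List.pyRange (i : Int) 0 (-1)).sum * 2 = (i : Int) * (i + 1) := by
  induction i with
  | zero => simp [PySem.List.pyRange_neg_one_eq_nil]
  | succ m ih =>
    rw [PySem.List.pyRange_neg_one_cons (by exact_mod_cast Nat.succ_pos m)]
    push_cast
    push_cast at ih
    simp only [List.sum_cons]
    ring_nf
    ring_nf at ih
    linarith

-- sum of range(2, i+1) = (i*(i+1) - 2)/2 for i ≥ 1 (stated doubled)
lemma sum_up (i : Nat) (h : 1 ≤ i) :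
    (PySem.List.pyRange 2 ((i : Int) + 1) 1).sum * 2 = (i : Int) * (i + 1) - 2 := by
  induction i with
  | zero => omega
  | succ m ih =>
    rcases Nat.eq_or_lt_of_le h with h1 | h1
    · have hm0 : m = 0 := by omega
      subst hm0
      norm_num [PySem.List.pyRange_one_eq_nil (by norm_num : ((1:Nat):Int) + 1 ≤ 2)]
    · have hm : 1 ≤ m := by omega
      have ihm := ih hm
      push_cast at ihm ⊢
      rw [PySem.List.pyRange_one_succ_right (by omega)]
      simp only [List.sum_append, List.sum_cons, List.sum_nil]
      linarith

lemma pyramidSum_main (n : Nat) :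
    3 * pyramidSum (n : Int) = (n : Int) * (n + 1) * (n + 2) - 3 * n := by
  induction n with
  | zero => simp [pyramidSum, PySem.List.pyRange_one_eq_nil]
  | succ m ih =>
    unfold pyramidSum at *
    push_cast
    rw [PySem.List.pyRange_one_succ_right (by omega), List.foldl_append]
    simp only [List.foldl_cons, List.foldl_nil]
    rw [show (fun (t j : Int) => t + j) = (fun t j => t + id j) from rfl,
      PySem.List.foldl_add, PySem.List.foldl_add]
    simp only [List.map_id, id_eq]
    have h1 := sum_down (m + 1)
    have h2 := sum_up (m + 1) (by omega)
    push_cast at h1 h2 ⊢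
    nlinarith [ih, h1, h2]

-- ===== VERDICT (by name: the statement is the Claim_ definition above) =====
theorem pyramidSum_spec : Claim_equal_pyramidSum := by
  intro n _
  unfold Spec_pyramidSum pyramidSum_alt
  by_cases h : n ≤ 0
  · simp [h, pyramidSum, PySem.List.pyRange_one_eq_nil (by omega : n + 1 ≤ 1)]
  · simp only [h, if_false]
    obtain ⟨m, rfl⟩ : ∃ m : Nat, n = (m : Int) := ⟨n.toNat, by omega⟩
    have hm := pyramidSum_main m
    have hq : PySem.Int.floordiv ((m : Int) * (m + 1) * (m + 2)) 3 = pyramidSum (m : Int) + m := by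
      rw [PySem.Int.floordiv_eq_iff_of_pos (by norm_num)]
      constructor <;> nlinarith [hm]
    rw [hq]; ring
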